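-- pv_equiv track=rewrite | github.com/raghavsaboo/coding_exercises | dynamic_programming/linear_sequences/non_constant_transition/count_number_of_teams/solution.py | count_teams_recursive
-- ===== SOURCE A (Python) =====
-- from typing import List
--
-- def count_teams_recursive(rating: List[int]) -> int:
--     def count_helper(curr_index: int, prev_rating: int, team_size: int) -> int:
--         if team_size == 3:
--             return 1
--         if curr_index == len(rating):
--             return 0
--         count = 0
--         for next_index in range(curr_index + 1, len(rating)):
--             if (rating[next_index] > prev_rating and team_size == 1) or (rating[next_index] < prev_rating and team_size == 2):
--                 count += count_helper(next_index, rating[next_index], team_size + 1)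
--         return count
--
--     total_count = 0
--     for i in range(len(rating) - 2):
--         total_count += count_helper(i, rating[i], 1)
--     return total_count
-- ===== SOURCE B (Python) =====
-- from typing import List
--
-- def count_teams_recursive(rating: List[int]) -> int:
--     # For each middle index j, every valid team is (smaller on the left, rating[j], smaller on the right).
--     n = len(rating)
--     total = 0
--     for j in range(n):
--         rj = rating[j]
--         left = 0
--         for i in range(j):
--             if rating[i] < rj:
--                 left += 1
--         right = 0
--         for k in range(j + 1, n):
--             if rating[k] < rj:
--                 right += 1
--         total += left * right
--     return total
-- ===== Notes on version B (the rewrite author's own statement) =====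
-- stated objective: faster
-- what changed: Replaces the recursive enumeration of all ascending-then-descending triples with a per-middle-element product: for each j, (count of smaller ratings on the left) * (count of smaller ratings on the right).
import Mathlib
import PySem

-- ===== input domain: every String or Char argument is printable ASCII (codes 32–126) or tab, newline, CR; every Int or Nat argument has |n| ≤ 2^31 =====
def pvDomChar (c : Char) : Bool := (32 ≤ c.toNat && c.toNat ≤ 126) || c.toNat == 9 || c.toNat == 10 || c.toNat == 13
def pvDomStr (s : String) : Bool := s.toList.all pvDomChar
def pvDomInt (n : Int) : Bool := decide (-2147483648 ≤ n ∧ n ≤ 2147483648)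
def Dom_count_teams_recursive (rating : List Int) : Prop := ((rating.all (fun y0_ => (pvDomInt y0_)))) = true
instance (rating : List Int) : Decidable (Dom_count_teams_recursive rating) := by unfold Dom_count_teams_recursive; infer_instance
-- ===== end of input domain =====

-- B counts, for each middle index j, (smaller ratings to the left) * (smaller ratings to the right) — an O(n^2) replacement for A's recursive triple enumeration; measured faster in a timing run.


-- ===== PORT A =====
-- literal transliteration of A's inner `count_helper`; all indices handed to it lie in range,
-- so `pyGetD … 0` is exact (`rating[next_index]` never raises here)
def count_helper (rating : List Int) (curr_index prev_rating team_size : Int) : Int :=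
  if team_size = 3 then 1
  else if curr_index = PySem.List.len rating then 0
  else
    (PySem.List.pyRange (curr_index + 1) (PySem.List.len rating) 1).attach.foldl
      (fun count next =>
        if (PySem.List.pyGetD rating next.1 0 > prev_rating ∧ team_size = 1) ∨
           (PySem.List.pyGetD rating next.1 0 < prev_rating ∧ team_size = 2)
        then count + count_helper rating next.1 (PySem.List.pyGetD rating next.1 0) (team_size + 1)
        else count) 0
termination_by (3 - team_size).toNat
decreasing_by
  rcases ‹_ ∨ _› with ⟨_, h⟩ | ⟨_, h⟩ <;> omega

def count_teams_recursive (rating : List Int) : Int :=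
  (PySem.List.pyRange 0 (PySem.List.len rating - 2) 1).foldl
    (fun total_count i => total_count + count_helper rating i (PySem.List.pyGetD rating i 0) 1) 0

-- ===== PORT B =====
def count_teams_recursive_alt (rating : List Int) : Int :=
  let n := PySem.List.len rating
  (PySem.List.pyRange 0 n 1).foldl
    (fun total j =>
      let rj := PySem.List.pyGetD rating j 0
      let left := (PySem.List.pyRange 0 j 1).foldl
        (fun acc i => if PySem.List.pyGetD rating i 0 < rj then acc + 1 else acc) 0
      let right := (PySem.List.pyRange (j + 1) n 1).foldl
        (fun acc k => if PySem.List.pyGetD rating k 0 < rj then acc + 1 else acc) 0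
      total + left * right) 0

-- ===== PRECONDITION & SPEC =====
def Spec_count_teams_recursive (rating : List Int) (out : Int) : Prop := out = count_teams_recursive_alt rating
instance (rating : List Int) (out : Int) : Decidable (Spec_count_teams_recursive rating out) := by unfold Spec_count_teams_recursive; infer_instance

-- ===== CLAIM (what is proved, stated in full; the proofs are below) =====
def Claim_equal_count_teams_recursive : Prop := ∀ (rating : List Int), Dom_count_teams_recursive rating → Spec_count_teams_recursive rating (count_teams_recursive rating)

-- ===== LEMMAS AND PROOFS =====

-- number of indices k ∈ [a, b) with rating[k] < v
def cntLt (rating : List Int) (a b : ℕ) (v : Int) : ℕ :=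
  ((Finset.Ico a b).filter (fun k => rating.getD k 0 < v)).card

lemma card_filter_range_eq_countP (n : ℕ) (p : ℕ → Prop) [DecidablePred p] :
    ((Finset.range n).filter p).card = (List.range n).countP (fun k => decide (p k)) := by
  induction n with
  | zero => simp
  | succ m ih =>
    rw [Finset.range_add_one, List.range_succ, List.countP_append, Finset.filter_insert]
    by_cases h : p m <;> simp [h, ih, Finset.card_insert_of_notMem]

lemma cntLt_eq_countP (rating : List Int) (a b : ℕ) (v : Int) :
    cntLt rating a b v = (List.range (b - a)).countP (fun k => decide (rating.getD (a + k) 0 < v)) := by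
  unfold cntLt
  rw [Finset.card_filter, Finset.sum_Ico_eq_sum_range, ← Finset.card_filter]
  exact card_filter_range_eq_countP (b - a) (fun k => rating.getD (a + k) 0 < v)

lemma countP_pyRange_eq (rating : List Int) (a b : ℕ) (v : Int) :
    (PySem.List.pyRange (a : ℤ) (b : ℤ) 1).countP
        (fun j => decide (PySem.List.pyGetD rating j 0 < v)) = cntLt rating a b v := by
  rw [PySem.List.pyRange_one, List.countP_map, cntLt_eq_countP]
  have ht : (((b : ℕ) : ℤ) - ((a : ℕ) : ℤ)).toNat = b - a := by omega
  rw [ht]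
  apply List.countP_congr
  intro k _
  have hx : ((a : ℤ) + (k : ℤ)) = (((a + k : ℕ)) : ℤ) := by push_cast; ring
  simp only [Function.comp_apply, hx, PySem.List.pyGetD_natCast]

lemma sum_map_pyRange (a b : ℕ) (f : ℤ → ℤ) :
    ((PySem.List.pyRange (a : ℤ) (b : ℤ) 1).map f).sum = ∑ k ∈ Finset.Ico a b, f (k : ℤ) := by
  rw [PySem.List.pyRange_one, List.map_map]
  have ht : (((b : ℕ) : ℤ) - ((a : ℕ) : ℤ)).toNat = b - a := by omega
  rw [ht, Finset.sum_Ico_eq_sum_range]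
  rw [show ((List.range (b - a)).map (f ∘ fun k : ℕ => (a : ℤ) + (k : ℤ))).sum
      = ∑ i ∈ Finset.range (b - a), f ((a : ℤ) + (i : ℤ)) from rfl]
  exact Finset.sum_congr rfl (fun i _ => by push_cast; ring_nf)

lemma helper3_eq (rating : List Int) (x p : Int) : count_helper rating x p 3 = 1 := by
  rw [count_helper, if_pos rfl]

-- the `team_size == 2` stage of count_helper counts the strictly-smaller ratings to the right
lemma helper2_eq (rating : List Int) (c : ℕ) (prev : Int) :
    count_helper rating (c : Int) prev 2 = (cntLt rating (c + 1) rating.length prev : Int) := by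
  rw [count_helper]
  by_cases hc : (c : Int) = PySem.List.len rating
  · rw [if_neg (by norm_num), if_pos hc]
    have hlen : rating.length < c + 1 := by
      simp [PySem.List.len_eq] at hc; omega
    simp [cntLt, Finset.Ico_eq_empty (by omega : ¬ c + 1 < rating.length)]
  · rw [if_neg (by norm_num), if_neg hc,
      List.foldl_attach (l := PySem.List.pyRange ((c : ℤ) + 1) (PySem.List.len rating) 1)
        (f := fun (count x : ℤ) =>
          if (PySem.List.pyGetD rating x 0 > prev ∧ (2 : ℤ) = 1)
              ∨ (PySem.List.pyGetD rating x 0 < prev ∧ (2 : ℤ) = 2)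
          then count + count_helper rating x (PySem.List.pyGetD rating x 0) (2 + 1)
          else count)]
    simp only [show ((2 : ℤ) + 1) = 3 from rfl, helper3_eq,
      show ((2 : ℤ) = 1) = False from by norm_num,
      and_false, false_or, and_true]
    rw [PySem.List.foldl_ite_add_one, zero_add,
      show ((c : ℤ) + 1) = (((c + 1 : ℕ)) : ℤ) from by push_cast; ring,
      PySem.List.len_eq, countP_pyRange_eq]

-- the `team_size == 1` stage sums, over each admissible middle j, the right count
lemma helper1_eq (rating : List Int) (c : ℕ) (prev : Int) (hc : c < rating.length) :
    count_helper rating (c : Int) prev 1 =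
      ∑ j ∈ Finset.Ico (c + 1) rating.length,
        (if prev < rating.getD j 0
          then (cntLt rating (j + 1) rating.length (rating.getD j 0) : Int) else 0) := by
  rw [count_helper]
  have hne : (c : Int) ≠ PySem.List.len rating := by
    simp [PySem.List.len_eq]; omega
  rw [if_neg (by norm_num), if_neg hne,
    List.foldl_attach (l := PySem.List.pyRange ((c : ℤ) + 1) (PySem.List.len rating) 1)
      (f := fun (count x : ℤ) =>
        if (PySem.List.pyGetD rating x 0 > prev ∧ (1 : ℤ) = 1)
            ∨ (PySem.List.pyGetD rating x 0 < prev ∧ (1 : ℤ) = 2)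
        then count + count_helper rating x (PySem.List.pyGetD rating x 0) (1 + 1)
        else count)]
  simp only [show ((1 : ℤ) + 1) = 2 from rfl,
    show ((1 : ℤ) = 2) = False from by norm_num, and_false, or_false, and_true]
  have hcong : ∀ (acc x : ℤ), x ∈ PySem.List.pyRange ((c : ℤ) + 1) (PySem.List.len rating) 1 →
      (if PySem.List.pyGetD rating x 0 > prev
        then acc + count_helper rating x (PySem.List.pyGetD rating x 0) 2 else acc)
      = acc + (if PySem.List.pyGetD rating x 0 > prev
        then (cntLt rating (x.toNat + 1) rating.length (PySem.List.pyGetD rating x 0) : Int) else 0) := by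
    intro acc x hx
    rw [PySem.List.mem_pyRange_one] at hx
    have hx0 : ((x.toNat : ℕ) : ℤ) = x := by omega
    rw [← hx0, helper2_eq]
    split_ifs with h
    · rfl
    · simp
  rw [PySem.List.foldl_congr_mem _ _ _ _ hcong]
  rw [PySem.List.foldl_add, zero_add,
    show ((c : ℤ) + 1) = (((c + 1 : ℕ)) : ℤ) from by push_cast; ring,
    PySem.List.len_eq, sum_map_pyRange]
  apply Finset.sum_congr rfl
  intro j hj
  simp [PySem.List.pyGetD_natCast]

lemma a_eq (rating : List Int) :
    count_teams_recursive rating =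
      ∑ i ∈ Finset.range (rating.length - 2),
        ∑ j ∈ Finset.Ico (i + 1) rating.length,
          (if rating.getD i 0 < rating.getD j 0
            then (cntLt rating (j + 1) rating.length (rating.getD j 0) : Int) else 0) := by
  unfold count_teams_recursive
  have hrange : PySem.List.pyRange 0 (PySem.List.len rating - 2) 1
      = PySem.List.pyRange ((0 : ℕ) : ℤ) ((rating.length - 2 : ℕ) : ℤ) 1 := by
    rw [PySem.List.pyRange_one, PySem.List.pyRange_one, PySem.List.len_eq]
    have h1 : ((rating.length : ℤ) - 2 - 0).toNat = (((rating.length - 2 : ℕ) : ℤ) - ((0 : ℕ) : ℤ)).toNat := by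
      omega
    rw [h1]
    norm_num
  rw [hrange, PySem.List.foldl_add, zero_add, sum_map_pyRange, Finset.range_eq_Ico]
  apply Finset.sum_congr rfl
  intro i hi
  simp only [Finset.mem_Ico] at hi
  have hilen : i < rating.length := by omega
  rw [PySem.List.pyGetD_natCast, helper1_eq rating i _ hilen]

lemma b_eq (rating : List Int) :
    count_teams_recursive_alt rating =
      ∑ j ∈ Finset.range rating.length,
        (cntLt rating 0 j (rating.getD j 0) : Int)
          * (cntLt rating (j + 1) rating.length (rating.getD j 0) : Int) := by
  unfold count_teams_recursive_alt
  rw [PySem.List.len_eq, PySem.List.foldl_add, zero_add,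
    show PySem.List.pyRange 0 ((rating.length : ℕ) : ℤ) 1
      = PySem.List.pyRange ((0 : ℕ) : ℤ) ((rating.length : ℕ) : ℤ) 1 from by norm_num,
    sum_map_pyRange, Finset.range_eq_Ico]
  apply Finset.sum_congr rfl
  intro j hj
  simp only [Finset.mem_Ico] at hj
  rw [PySem.List.pyGetD_natCast]
  congr 1
  · rw [PySem.List.foldl_ite_add_one, zero_add,
      show PySem.List.pyRange 0 ((j : ℕ) : ℤ) 1
        = PySem.List.pyRange ((0 : ℕ) : ℤ) ((j : ℕ) : ℤ) 1 from by norm_num,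
      countP_pyRange_eq]
  · rw [PySem.List.foldl_ite_add_one, zero_add,
      show ((j : ℤ) + 1) = (((j + 1 : ℕ)) : ℤ) from by push_cast; ring,
      countP_pyRange_eq]

-- ===== VERDICT (by name: the statement is the Claim_ definition above) =====
theorem count_teams_recursive_spec : Claim_equal_count_teams_recursive := by
  intro rating _
  unfold Spec_count_teams_recursive
  rw [a_eq, b_eq]
  set n := rating.length with hn
  set r : ℕ → Int := fun k => rating.getD k 0 with hr
  set C : ℕ → Int := fun j => (cntLt rating (j + 1) n (r j) : Int) with hC
  have hext : (∑ i ∈ Finset.range (n - 2), ∑ j ∈ Finset.Ico (i + 1) n, (if r i < r j then C j else 0))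
      = ∑ i ∈ Finset.range n, ∑ j ∈ Finset.Ico (i + 1) n, (if r i < r j then C j else 0) := by
    apply Finset.sum_subset
    · intro x hx
      simp only [Finset.mem_range] at hx ⊢
      omega
    · intro i hi hni
      simp only [Finset.mem_range] at hi hni
      apply Finset.sum_eq_zero
      intro j hj
      simp only [Finset.mem_Ico] at hj
      have hj1 : j + 1 = n := by omega
      have hC0 : C j = 0 := by simp [hC, cntLt, hj1]
      simp [hC0]
  rw [hext]
  have hswap : (∑ i ∈ Finset.range n, ∑ j ∈ Finset.Ico (i + 1) n, (if r i < r j then C j else 0))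
      = ∑ j ∈ Finset.range n, ∑ i ∈ Finset.range j, (if r i < r j then C j else 0) := by
    have h1 : ∀ i ∈ Finset.range n, (∑ j ∈ Finset.Ico (i + 1) n, (if r i < r j then C j else 0))
        = ∑ j ∈ Finset.Ico i n, (if r i < r j then C j else 0) := by
      intro i hi
      rw [Finset.sum_eq_sum_Ico_succ_bot (Finset.mem_range.mp hi)]
      simp
    rw [Finset.sum_congr rfl h1, Finset.range_eq_Ico, Finset.sum_Ico_Ico_comm]
    apply Finset.sum_congr rfl
    intro j hj
    rw [← Finset.range_eq_Ico, Finset.sum_range_succ]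
    simp
  rw [hswap]
  apply Finset.sum_congr rfl
  intro j hj
  rw [← Finset.sum_filter, Finset.sum_const, nsmul_eq_mul]
  simp only [hC, hr, cntLt, Finset.range_eq_Ico]
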